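-- pv_equiv track=rewrite | github.com/sexyseungyeol/berklee-quiz | Road_to_Berklee.py | _function_of
-- ===== SOURCE A (Python) =====
-- from typing import List, Optional, Dict
--
-- FUNCTIONS = {
--     'T': set(['I','I6','Imaj7','IIIm7','VIm7','I7','IIIm7b5','III7']),
--     'Tm': set(['Im','Im6','Imb6','Im7','ImM7','bIIImaj7','bIII+M7','VIm7b5']),
--     'SD': set(['IV','IV6','IVmaj7','IIm7','IV7','bVII','bVIImaj7','VII7']),
--     'SDm': set(['IVm','IVm6','IVm7','IIm7b5','bVI6','bVImaj7','bVII7','bIImaj7','bVI7','IVmM7']),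
--     'D': set(['V','V7','VIIm7b6','bII7','VIIdim7']),
--     'Dm': set(['Vm','Vm7']),
-- }
--
-- FUNCTION_OVERRIDES = {'#IVm7b5':['T','SD'], 'bVImaj7':['SDm','Tm']}
--
-- def _function_of(ch: str) -> List[str]:
--     if ch in FUNCTION_OVERRIDES:
--         return FUNCTION_OVERRIDES[ch]
--     outs = []
--     for fn, s in FUNCTIONS.items():
--         if ch in s:
--             outs.append(fn)
--     return outs or ["T"]
-- ===== SOURCE B (Python) =====
-- from typing import List
--
-- # Precomputed flat lookup table: every chord symbol appears in exactly one of
-- # the original six function-sets, and the two overrides take precedence, so the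
-- # whole mapping collapses to one literal dict answered by a single .get().
-- TABLE = {
--     '#IVm7b5': ['T', 'SD'],
--     'bVImaj7': ['SDm', 'Tm'],
--     'I': ['T'],
--     'I6': ['T'],
--     'I7': ['T'],
--     'III7': ['T'],
--     'IIIm7': ['T'],
--     'IIIm7b5': ['T'],
--     'Imaj7': ['T'],
--     'VIm7': ['T'],
--     'Im': ['Tm'],
--     'Im6': ['Tm'],
--     'Im7': ['Tm'],
--     'ImM7': ['Tm'],
--     'Imb6': ['Tm'],
--     'VIm7b5': ['Tm'],
--     'bIII+M7': ['Tm'],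
--     'bIIImaj7': ['Tm'],
--     'IIm7': ['SD'],
--     'IV': ['SD'],
--     'IV6': ['SD'],
--     'IV7': ['SD'],
--     'IVmaj7': ['SD'],
--     'VII7': ['SD'],
--     'bVII': ['SD'],
--     'bVIImaj7': ['SD'],
--     'IIm7b5': ['SDm'],
--     'IVm': ['SDm'],
--     'IVm6': ['SDm'],
--     'IVm7': ['SDm'],
--     'IVmM7': ['SDm'],
--     'bIImaj7': ['SDm'],
--     'bVI6': ['SDm'],
--     'bVI7': ['SDm'],
--     'bVII7': ['SDm'],
--     'V': ['D'],
--     'V7': ['D'],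
--     'VIIdim7': ['D'],
--     'VIIm7b6': ['D'],
--     'bII7': ['D'],
--     'Vm': ['Dm'],
--     'Vm7': ['Dm'],
-- }
--
-- def _function_of(ch: str) -> List[str]:
--     return TABLE.get(ch, ["T"])
-- ===== Notes on version B (the rewrite author's own statement) =====
-- stated objective: simpler
-- what changed: A checks an overrides dict and then scans all six FUNCTIONS sets per call; B collapses the whole mapping (overrides plus the one-entry-per-chord inverted data, valid because every chord occurs in exactly one set) into a single precomputed literal dict and answers each call with one TABLE.get(ch, ['T']).
import Mathlib
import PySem

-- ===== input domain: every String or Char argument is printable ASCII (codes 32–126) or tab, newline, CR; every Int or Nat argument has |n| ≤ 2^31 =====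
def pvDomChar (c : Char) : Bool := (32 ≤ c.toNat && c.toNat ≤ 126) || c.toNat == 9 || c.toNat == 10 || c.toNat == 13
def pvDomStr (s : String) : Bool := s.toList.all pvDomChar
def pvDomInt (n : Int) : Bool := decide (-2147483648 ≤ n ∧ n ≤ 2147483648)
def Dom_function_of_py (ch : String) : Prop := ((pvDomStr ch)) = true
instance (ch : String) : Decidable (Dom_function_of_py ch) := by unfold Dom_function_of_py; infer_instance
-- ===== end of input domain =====

-- B replaces A's per-call overrides check + scan over the six FUNCTIONS sets by one
-- precomputed flat literal table answered by a single lookup (simpler call path).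

-- ===== PORT A =====
def pvFUNCTIONS : List (String × PySem.Set String) := [
  ("T",   PySem.Set.ofList ["I","I6","Imaj7","IIIm7","VIm7","I7","IIIm7b5","III7"]),
  ("Tm",  PySem.Set.ofList ["Im","Im6","Imb6","Im7","ImM7","bIIImaj7","bIII+M7","VIm7b5"]),
  ("SD",  PySem.Set.ofList ["IV","IV6","IVmaj7","IIm7","IV7","bVII","bVIImaj7","VII7"]),
  ("SDm", PySem.Set.ofList ["IVm","IVm6","IVm7","IIm7b5","bVI6","bVImaj7","bVII7","bIImaj7","bVI7","IVmM7"]),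
  ("D",   PySem.Set.ofList ["V","V7","VIIm7b6","bII7","VIIdim7"]),
  ("Dm",  PySem.Set.ofList ["Vm","Vm7"])]

def pvOVERRIDES : PySem.Dict String (List String) :=
  PySem.Dict.ofList [("#IVm7b5", ["T","SD"]), ("bVImaj7", ["SDm","Tm"])]

def function_of_py (ch : String) : List String :=
  match PySem.Dict.get? pvOVERRIDES ch with
  | some v => v
  | none =>
    let outs := pvFUNCTIONS.foldl
      (fun outs p => if PySem.Set.contains p.2 ch then outs ++ [p.1] else outs) []
    if outs = [] then ["T"] else outs

-- ===== PORT B =====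
-- B's precomputed flat table (Source B's TABLE literal): overrides first, then one
-- entry per chord (every chord occurs in exactly one FUNCTIONS set).
def pvTABLE : PySem.Dict String (List String) := PySem.Dict.ofList [
  ("#IVm7b5", ["T", "SD"]),
  ("bVImaj7", ["SDm", "Tm"]),
  ("I", ["T"]),
  ("I6", ["T"]),
  ("I7", ["T"]),
  ("III7", ["T"]),
  ("IIIm7", ["T"]),
  ("IIIm7b5", ["T"]),
  ("Imaj7", ["T"]),
  ("VIm7", ["T"]),
  ("Im", ["Tm"]),
  ("Im6", ["Tm"]),
  ("Im7", ["Tm"]),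
  ("ImM7", ["Tm"]),
  ("Imb6", ["Tm"]),
  ("VIm7b5", ["Tm"]),
  ("bIII+M7", ["Tm"]),
  ("bIIImaj7", ["Tm"]),
  ("IIm7", ["SD"]),
  ("IV", ["SD"]),
  ("IV6", ["SD"]),
  ("IV7", ["SD"]),
  ("IVmaj7", ["SD"]),
  ("VII7", ["SD"]),
  ("bVII", ["SD"]),
  ("bVIImaj7", ["SD"]),
  ("IIm7b5", ["SDm"]),
  ("IVm", ["SDm"]),
  ("IVm6", ["SDm"]),
  ("IVm7", ["SDm"]),
  ("IVmM7", ["SDm"]),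
  ("bIImaj7", ["SDm"]),
  ("bVI6", ["SDm"]),
  ("bVI7", ["SDm"]),
  ("bVII7", ["SDm"]),
  ("V", ["D"]),
  ("V7", ["D"]),
  ("VIIdim7", ["D"]),
  ("VIIm7b6", ["D"]),
  ("bII7", ["D"]),
  ("Vm", ["Dm"]),
  ("Vm7", ["Dm"])]

def function_of_py_alt (ch : String) : List String :=
  PySem.Dict.getD pvTABLE ch ["T"]

-- ===== PRECONDITION & SPEC =====
def Spec_function_of_py (ch : String) (out : List String) : Prop := out = function_of_py_alt ch
instance (ch : String) (out : List String) : Decidable (Spec_function_of_py ch out) := by unfold Spec_function_of_py; infer_instance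

-- ===== CLAIM =====
def Claim_equal_function_of_py : Prop := ∀ (ch : String), Dom_function_of_py ch → Spec_function_of_py ch (function_of_py ch)

-- ===== LEMMAS AND PROOFS =====
-- the 42 keys of pvTABLE (= the two override keys plus every chord of pvFUNCTIONS)
def pvKEYS : List String := ["#IVm7b5", "bVImaj7", "I", "I6", "I7", "III7", "IIIm7", "IIIm7b5", "Imaj7", "VIm7", "Im", "Im6", "Im7", "ImM7", "Imb6", "VIm7b5", "bIII+M7", "bIIImaj7", "IIm7", "IV", "IV6", "IV7", "IVmaj7", "VII7", "bVII", "bVIImaj7", "IIm7b5", "IVm", "IVm6", "IVm7", "IVmM7", "bIImaj7", "bVI6", "bVI7", "bVII7", "V", "V7", "VIIdim7", "VIIm7b6", "bII7", "Vm", "Vm7"]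

set_option maxRecDepth 20000 in
theorem pv_eq (ch : String) : function_of_py ch = function_of_py_alt ch := by
  by_cases h : ch ∈ pvKEYS
  · fin_cases h <;> decide
  · have hc : ∀ (l : List String), (∀ x ∈ l, x ∈ pvKEYS) →
        PySem.Set.contains (PySem.Set.ofList l) ch = false := by
      intro l hl
      apply Bool.eq_false_iff.mpr
      intro hcon
      exact h (hl ch ((PySem.Set.mem_ofList l ch).mp
        ((PySem.Set.contains_iff _ ch).mp hcon)))
    have hov : PySem.Dict.get? pvOVERRIDES ch = none := by
      rw [PySem.Dict.get?_eq_none_iff_not_mem_keys]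
      intro hm
      have : ch ∈ pvKEYS := by
        have hk : pvOVERRIDES.keys = ["#IVm7b5", "bVImaj7"] := by decide
        rw [hk] at hm
        fin_cases hm <;> decide
      exact h this
    have h1 := hc ["I","I6","Imaj7","IIIm7","VIm7","I7","IIIm7b5","III7"] (by decide)
    have h2 := hc ["Im","Im6","Imb6","Im7","ImM7","bIIImaj7","bIII+M7","VIm7b5"] (by decide)
    have h3 := hc ["IV","IV6","IVmaj7","IIm7","IV7","bVII","bVIImaj7","VII7"] (by decide)
    have h4 := hc ["IVm","IVm6","IVm7","IIm7b5","bVI6","bVImaj7","bVII7","bIImaj7","bVI7","IVmM7"] (by decide)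
    have h5 := hc ["V","V7","VIIm7b6","bII7","VIIdim7"] (by decide)
    have h6 := hc ["Vm","Vm7"] (by decide)
    have htab : PySem.Dict.getD pvTABLE ch ["T"] = ["T"] := by
      apply PySem.Dict.getD_of_not_contains
      rw [PySem.Dict.contains_eq_decide_mem_keys]
      have hk : pvTABLE.keys = pvKEYS := by decide
      rw [hk]
      simpa using h
    unfold function_of_py function_of_py_alt
    rw [hov, htab]
    simp only [pvFUNCTIONS, List.foldl, h1, h2, h3, h4, h5, h6, Bool.false_eq_true,
      if_false]
    simp

-- ===== VERDICT =====
theorem function_of_py_spec : Claim_equal_function_of_py := by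
  intro ch _
  exact pv_eq ch
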